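-- pv_equiv track=rewrite | github.com/knurl/bigbang | bigbang.py | genmask
-- ===== SOURCE A (Python) =====
-- def genmask(target, octet):
--     assert octet < 256
--     if target in ("aws", "az"):
--         return f"10.{octet}.0.0/16"
--     elif target == "gcp":
--         # Get top four bits and combine with 2nd octet
--         ipnum = 0xAC10 << 16 # 172.16.0.0
--         ipnum |= octet << 12
--         octets = []
--         while ipnum > 0:
--             octets.append(str(ipnum & 0xFF))
--             ipnum >>= 8
--         return ".".join(octets[::-1]) + "/20"
-- ===== SOURCE B (Python) =====
-- def genmask(target, octet):
--     assert octet < 256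
--     if target in ("aws", "az"):
--         return f"10.{octet}.0.0/16"
--     elif target == "gcp":
--         # 172.16.0.0 | octet<<12, i.e. 172.(16 + octet//16).(octet%16 * 16).0
--         return f"172.{16 + octet // 16}.{octet % 16 * 16}.0/20"
-- ===== Notes on version B (the rewrite author's own statement) =====
-- stated objective: simpler
-- what changed: The gcp branch's bit-peeling while loop over the 32-bit integer (append bytes, reverse, join) is replaced by one closed-form f-string that computes the two variable octets directly as 16 + octet//16 and octet%16*16.
-- intended difference: For target 'gcp' with octet < 0, A's ipnum is negative so its while loop never runs and A returns the bare string '/20'; B returns the arithmetically formed address (e.g. '172.15.240.0/20' for octet=-1), which follows the intended 172.16.0.0|octet<<12 pattern instead of an accident of the empty loop. — e.g. on genmask("gcp", -1): A returns some "/20", B returns some "172.15.240.0/20"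
import Mathlib
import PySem

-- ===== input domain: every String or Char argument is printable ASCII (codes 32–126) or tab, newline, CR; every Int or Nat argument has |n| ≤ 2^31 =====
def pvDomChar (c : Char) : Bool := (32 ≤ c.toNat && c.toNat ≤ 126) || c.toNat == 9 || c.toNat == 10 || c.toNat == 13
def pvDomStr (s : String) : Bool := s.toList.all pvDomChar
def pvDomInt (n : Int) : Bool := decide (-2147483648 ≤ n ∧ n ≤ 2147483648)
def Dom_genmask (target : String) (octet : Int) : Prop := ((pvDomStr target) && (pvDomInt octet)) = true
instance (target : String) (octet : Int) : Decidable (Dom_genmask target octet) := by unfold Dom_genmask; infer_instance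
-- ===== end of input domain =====

-- B replaces A's gcp bit-peeling while loop (append bytes, reverse, join) with one closed-form
-- f-string whose variable octets are computed by //16 and %16 arithmetic (objective: simpler).

-- ===== PORT A =====
-- 'while ipnum > 0: octets.append(str(ipnum & 0xFF)); ipnum >>= 8' — fuel makes the loop total;
-- fuel = ipnum.toNat + 1 always suffices since a positive ipnum strictly shrinks under >>> 8.
def genmaskLoop : Nat → Int → List String → List String
  | 0, _, octets => octets
  | fuel+1, ipnum, octets =>
    if 0 < ipnum then
      genmaskLoop fuel (ipnum >>> 8) (octets ++ [PySem.Int.toStr (PySem.Int.band ipnum 255)])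
    else octets

def genmask (target : String) (octet : Int) : Option String :=
  if 256 ≤ octet then none  -- 'assert octet < 256' raises AssertionError; excluded by Pre_genmask
  else if target = "aws" ∨ target = "az" then
    some (PySem.Str.join "" ["10.", PySem.Int.toStr octet, ".0.0/16"])
  else if target = "gcp" then
    let ipnum : Int := PySem.Int.bor ((0xAC10 : Int) <<< (16:Nat)) (octet <<< (12:Nat))
    -- 'octets[::-1]' is List.reverse (PySem.List.slice?_none_none_neg_one)
    some (PySem.Str.join "" [PySem.Str.join "." (genmaskLoop (ipnum.toNat + 1) ipnum []).reverse, "/20"])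
  else none

-- ===== PORT B =====
def genmask_alt (target : String) (octet : Int) : Option String :=
  if 256 ≤ octet then none  -- 'assert octet < 256' raises AssertionError; excluded by Pre_genmask
  else if target = "aws" ∨ target = "az" then
    some (PySem.Str.join "" ["10.", PySem.Int.toStr octet, ".0.0/16"])
  else if target = "gcp" then
    some (PySem.Str.join "" ["172.", PySem.Int.toStr (16 + PySem.Int.floordiv octet 16), ".",
                             PySem.Int.toStr (PySem.Int.mod octet 16 * 16), ".0/20"])
  else none

-- ===== PRECONDITION & SPEC =====
-- Pre_ excludes exactly the inputs where A's 'assert octet < 256' raises AssertionError.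
def Pre_genmask (target : String) (octet : Int) : Prop := octet < 256
instance (target : String) (octet : Int) : Decidable (Pre_genmask target octet) := by
  unfold Pre_genmask; infer_instance

def pvWitness_genmask : String × Int := ("gcp", 7)

-- For target 'gcp' with octet < 0, A's ipnum is negative so its while loop never runs and A returns
-- the bare string "/20"; B returns the arithmetically formed address, the intended 172.16/12 pattern.
def D_genmask (target : String) (octet : Int) : Prop := target = "gcp" ∧ octet < 0
instance (target : String) (octet : Int) : Decidable (D_genmask target octet) := by
  unfold D_genmask; infer_instance

def Spec_genmask (target : String) (octet : Int) (out : Option String) : Prop :=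
  ¬ D_genmask target octet → out = genmask_alt target octet
instance (target : String) (octet : Int) (out : Option String) : Decidable (Spec_genmask target octet out) := by
  unfold Spec_genmask; infer_instance

def pvDiffWitness_genmask : String × Int := ("gcp", -1)
def pvDiffWitnessOut_genmask : (Option String) × (Option String) :=
  (some "/20", some "172.15.240.0/20")

-- ===== CLAIM (what is proved, stated in full; the proofs are below) =====
def Claim_unchanged_genmask : Prop := ∀ (target : String) (octet : Int), Dom_genmask target octet → Pre_genmask target octet → Spec_genmask target octet (genmask target octet)
def Claim_changed_genmask : Prop := Dom_genmask (pvDiffWitness_genmask.1) (pvDiffWitness_genmask.2) ∧ Pre_genmask (pvDiffWitness_genmask.1) (pvDiffWitness_genmask.2) ∧ D_genmask (pvDiffWitness_genmask.1) (pvDiffWitness_genmask.2) ∧ genmask (pvDiffWitness_genmask.1) (pvDiffWitness_genmask.2) = pvDiffWitnessOut_genmask.1 ∧ genmask_alt (pvDiffWitness_genmask.1) (pvDiffWitness_genmask.2) = pvDiffWitnessOut_genmask.2 ∧ pvDiffWitnessOut_genmask.1 ≠ pvDiffWitnessOut_genmask.2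
def Claim_exact_genmask : Prop := ∀ (target : String) (octet : Int), Dom_genmask target octet → Pre_genmask target octet → D_genmask target octet → genmask target octet ≠ genmask_alt target octet

-- ===== LEMMAS AND PROOFS =====

-- the gcp branch agrees on every octet 0 ≤ o < 256 (exhaustive kernel check)
set_option maxHeartbeats 4000000 in
set_option maxRecDepth 100000 in
theorem gcp_all : ∀ n ∈ List.range 256, genmask "gcp" (n : Int) = genmask_alt "gcp" (n : Int) := by
  decide

theorem gcp_eq (o : Int) (h0 : 0 ≤ o) (h1 : o < 256) :
    genmask "gcp" o = genmask_alt "gcp" o := by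
  have h := gcp_all o.toNat (by simp only [List.mem_range]; omega)
  rwa [Int.toNat_of_nonneg h0] at h

theorem bor_neg_right (a b : Int) (h : b < 0) : PySem.Int.bor a b < 0 := by
  unfold PySem.Int.bor
  split_ifs <;> omega

theorem genmask_gcp_neg (o : Int) (h : o < 0) : genmask "gcp" o = some "/20" := by
  have hb : PySem.Int.bor ((0xAC10 : Int) <<< (16:Nat)) (o <<< (12:Nat)) < 0 := by
    apply bor_neg_right
    rw [Int.shiftLeft_eq]
    nlinarith
  unfold genmask
  rw [if_neg (show ¬ (256:Int) ≤ o by omega),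
      if_neg (by decide : ¬(("gcp":String) = "aws" ∨ ("gcp":String) = "az")), if_pos rfl]
  simp only [genmaskLoop]
  rw [if_neg (by omega)]
  decide

theorem genmask_tight_aux (o : Int) (h : o < 0) : genmask "gcp" o ≠ genmask_alt "gcp" o := by
  rw [genmask_gcp_neg o h]
  unfold genmask_alt
  rw [if_neg (show ¬ (256:Int) ≤ o by omega), if_neg (by decide : ¬(("gcp":String) = "aws" ∨ ("gcp":String) = "az")), if_pos rfl]
  intro heq
  have h2 := congrArg (fun x => Option.map String.toList x) heq
  simp only [Option.map_some, Option.some.injEq, PySem.Str.toList_join, List.map_cons,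
    PySem.Chars.join_cons_cons] at h2
  have h3 := congrArg (fun l => l.head?) h2
  simp at h3

-- ===== VERDICT (by name: the statement is the Claim_ definition above) =====
theorem genmask_spec : Claim_unchanged_genmask := by
  intro target octet hdom hpre
  unfold Spec_genmask
  intro hnd
  unfold Pre_genmask at hpre
  have hlt : ¬ (256 ≤ octet) := by omega
  by_cases h1 : target = "aws" ∨ target = "az"
  · simp only [genmask, genmask_alt, if_neg hlt, if_pos h1]
  · by_cases h2 : target = "gcp"
    · subst h2
      have hnneg : 0 ≤ octet := by
        by_contra hlt2
        exact hnd ⟨rfl, by omega⟩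
      exact gcp_eq octet hnneg hpre
    · simp only [genmask, genmask_alt, if_neg hlt, if_neg h1, if_neg h2]

theorem genmask_changed : Claim_changed_genmask := by
  unfold Claim_changed_genmask; decide

theorem genmask_tight : Claim_exact_genmask := by
  intro target octet _ _ hd
  obtain ⟨ht, ho⟩ := hd
  subst ht
  exact genmask_tight_aux octet ho
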